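-- pv_equiv track=rewrite | github.com/chrysante/Prism | src/Prism/Sema/SemaFilters.py | build_inheritance_tree
-- ===== SOURCE A (Python) =====
-- def build_inheritance_tree(symbols):
--     name_to_symbol = {symbol['name']: symbol for symbol in symbols}
--     tree = {}
--     root = None
--     for symbol in symbols:
--         base_class = symbol.get('base', None)
--         if base_class:
--             if base_class not in tree:
--                 tree[base_class] = []
--             tree[base_class].append(symbol['name'])
--         else:
--             if symbol['name'] not in tree:
--                 tree[symbol['name']] = []
--             root = symbol
--
--     def render_tree(class_name, depth=0, is_last=True, prefix=''):
--         result = '// '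
--         if depth > 0:
--             result += prefix
--             if is_last:
--                 result += '╰╴'
--             else:
--                 result += '├╴'
--         result += class_name + '\n'
--         if class_name in tree:
--             children = tree[class_name]
--             new_prefix = '' if depth == 0 else prefix + ('│ ' if not is_last else '  ')
--             for i, child in enumerate(children):
--                 is_last = (i == len(children) - 1)
--                 result += render_tree(child, depth + 1, is_last=is_last, prefix=new_prefix)
--         return result
--
--     return render_tree(root.get('name', None))
-- ===== SOURCE B (Python) =====
-- def build_inheritance_tree(symbols):
--     # identical first pass as the original
--     tree = {}
--     root = None
--     for symbol in symbols:
--         base_class = symbol.get('base', None)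
--         if base_class:
--             if base_class not in tree:
--                 tree[base_class] = []
--             tree[base_class].append(symbol['name'])
--         else:
--             if symbol['name'] not in tree:
--                 tree[symbol['name']] = []
--             root = symbol
--
--     # iterative explicit-stack pre-order DFS instead of recursion
--     lines = []
--     stack = [(root.get('name', None), 0, True, '')]
--     while stack:
--         name, depth, is_last, prefix = stack.pop()
--         line = '// '
--         if depth > 0:
--             line += prefix + ('╰╴' if is_last else '├╴')
--         line += name + '\n'
--         lines.append(line)
--         children = tree.get(name)
--         if children is not None:
--             new_prefix = '' if depth == 0 else prefix + ('  ' if is_last else '│ ')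
--             for i, child in enumerate(reversed(children)):
--                 stack.append((child, depth + 1, i == 0, new_prefix))
--     return ''.join(lines)
-- ===== Notes on version B (the rewrite author's own statement) =====
-- stated objective: alternative
-- what changed: The recursive render_tree is replaced by an iterative pre-order DFS with an explicit stack of (name, depth, is_last, prefix) frames that pushes children in reverse and collects the lines in a list joined at the end; the tree/root-building first pass is unchanged.
import Mathlib
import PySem

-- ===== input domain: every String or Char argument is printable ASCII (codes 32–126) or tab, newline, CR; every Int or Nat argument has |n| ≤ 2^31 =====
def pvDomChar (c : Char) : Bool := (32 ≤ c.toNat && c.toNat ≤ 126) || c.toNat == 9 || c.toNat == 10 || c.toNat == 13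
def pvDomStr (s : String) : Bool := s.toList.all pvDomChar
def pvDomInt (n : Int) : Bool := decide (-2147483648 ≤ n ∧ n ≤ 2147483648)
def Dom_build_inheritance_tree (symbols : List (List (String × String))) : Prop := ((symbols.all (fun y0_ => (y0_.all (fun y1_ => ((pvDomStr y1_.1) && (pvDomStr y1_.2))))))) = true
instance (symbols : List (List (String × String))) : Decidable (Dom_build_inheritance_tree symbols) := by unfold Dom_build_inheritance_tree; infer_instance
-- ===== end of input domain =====

-- B replaces A's recursive render_tree by an explicit-stack iterative pre-order DFS that
-- collects the lines in a list and joins them at the end (objective: alternative decomposition,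
-- same cost). The first pass building the tree and the root is identical in A and B.

-- ===== PORT A =====

-- Shared first pass of A and B (identical in both Pythons): builds the children map `tree`
-- and the last base-less symbol `root`. Each raw pair list is read as the Python dict it
-- denotes via PySem.Dict.ofList. symbol['name'] is ported as getD "name" "" — Pre_ requires
-- every symbol to carry a "name" key (Python raises KeyError otherwise).
def pvPass1 (symbols : List (List (String × String))) :
    PySem.Dict String (List String) × Option (PySem.Dict String String) :=
  symbols.foldl
    (fun st symRaw =>
      let symbol := PySem.Dict.ofList symRaw
      let base_class := (symbol.get? "base").getD ""   -- symbol.get('base', None); "if base_class:" = ≠ ""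
      if base_class ≠ "" then
        let tree := if st.1.contains base_class then st.1 else st.1.insert base_class []
        (tree.modify base_class [] (fun l => l ++ [symbol.getD "name" ""]), st.2)
      else
        let name := symbol.getD "name" ""
        ((if st.1.contains name then st.1 else st.1.insert name []), some symbol))
    (PySem.Dict.empty, none)

-- The line rendered for one node ('result' before the children loop; identical text in A and B).
def pvLine (class_name : String) (depth : Nat) (is_last : Bool) (pfx : String) : String :=
  let result := "// "
  let result := if depth > 0 then result ++ pfx ++ (if is_last then "╰╴" else "├╴") else result
  result ++ class_name ++ "\n"

def pvNewPrefix (depth : Nat) (is_last : Bool) (pfx : String) : String :=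
  if depth = 0 then "" else pfx ++ (if is_last then "  " else "│ ")

-- render_tree, with a fuel guard on the recursion into children (Python recurses without a
-- guard; with fuel = symbols.length + 1 the guard is never hit on the acyclic inputs Pre_ admits).
def pvRenderA (tree : PySem.Dict String (List String)) (fuel : Nat) (class_name : String)
    (depth : Nat) (is_last : Bool) (pfx : String) : String :=
  let result := pvLine class_name depth is_last pfx
  match tree.get? class_name with
  | none => result
  | some children =>
    match fuel with
    | 0 => result        -- fuel guard only; unreachable under Pre_
    | f + 1 =>
      let new_prefix := pvNewPrefix depth is_last pfx
      (PySem.List.enumerate children 0).foldl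
        (fun acc p =>
          acc ++ pvRenderA tree f p.2 (depth + 1) (p.1 == (children.length : Int) - 1) new_prefix)
        result
  termination_by fuel

def build_inheritance_tree (symbols : List (List (String × String))) : String :=
  -- name_to_symbol is built and never used in the Python; kept as dead code.
  let _name_to_symbol := symbols.foldl
    (fun d symRaw => d.insert ((PySem.Dict.ofList symRaw).getD "name" "") (PySem.Dict.ofList symRaw))
    (PySem.Dict.empty : PySem.Dict String (PySem.Dict String String))
  match pvPass1 symbols with
  | (tree, some root) => pvRenderA tree (symbols.length + 1) (root.getD "name" "") 0 true ""
  | (_, none) => ""    -- Python raises AttributeError (root is None); excluded by Pre_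

-- ===== PORT B =====

-- children lists live in tree.values; bound used by the termination measure of the stack loop
def pvMaxKids (tree : PySem.Dict String (List String)) : Nat :=
  (tree.values.map List.length).foldr max 0

theorem pvMem_le_foldr_max (a : Nat) (l : List Nat) (h : a ∈ l) : a ≤ l.foldr max 0 := by
  induction l with
  | nil => cases h
  | cons x t ih =>
    rcases List.mem_cons.mp h with rfl | h'
    · exact Nat.le_max_left _ _
    · exact le_trans (ih h') (Nat.le_max_right _ _)

theorem pvSum_foldl_cons {α β : Type} (w : β → Nat) (g : α → β) (l : List α)
    (rest : List β) :
    ((l.foldl (fun st x => g x :: st) rest).map w).sum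
      = (l.map (w ∘ g)).sum + ((rest.map w).sum) := by
  induction l generalizing rest with
  | nil => simp
  | cons x t ih => simp [ih]; omega

-- the while-loop of B: stack of frames (fuel, class_name, depth, is_last, pfx), top at the
-- head (Python appends/pops at the end); each popped node appends its line and pushes its
-- children in reversed order, each child with is_last = (i == 0) in the reversed enumeration.
-- Frames carry a fuel guard exactly as pvRenderA does; unreachable under Pre_.
def pvLoopB (tree : PySem.Dict String (List String)) :
    List (Nat × String × Nat × Bool × String) → List String → List String
  | [], lines => lines
  | (fuel, name, depth, is_last, pfx) :: rest, lines =>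
    let lines' := lines ++ [pvLine name depth is_last pfx]
    match h : tree.get? name, fuel with
    | none, _ => pvLoopB tree rest lines'
    | some _, 0 => pvLoopB tree rest lines'      -- fuel guard only; unreachable under Pre_
    | some children, f + 1 =>
      let np := pvNewPrefix depth is_last pfx
      pvLoopB tree
        ((PySem.List.enumerate children.reverse 0).foldl
          (fun st p => (f, p.2, depth + 1, p.1 == 0, np) :: st) rest) lines'
  termination_by stack _ => ((stack.map (fun fr => (pvMaxKids tree + 2) ^ fr.1)).sum)
  decreasing_by
  · rename_i fu
    have hp : 0 < (pvMaxKids tree + 2) ^ fu := Nat.pow_pos (by omega)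
    simp only [List.map_cons, List.sum_cons]; omega
  · have hp : 0 < (pvMaxKids tree + 2) ^ (0 : Nat) := Nat.pow_pos (by omega)
    simp only [List.map_cons, List.sum_cons]; omega
  · simp only [List.map_cons, List.sum_cons, List.unattach_reverse, List.unattach_attach]
    rw [pvSum_foldl_cons]
    have hmem : children ∈ tree.values := by
      have hit := PySem.Dict.mem_items_of_get?_eq_some _ h
      simp only [PySem.Dict.values, List.mem_map]
      exact ⟨(name, children), hit, rfl⟩
    have hlen : children.length ≤ pvMaxKids tree := by
      apply pvMem_le_foldr_max
      simp only [List.mem_map]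
      exact ⟨children, hmem, rfl⟩
    have hk : ((PySem.List.enumerate children.reverse 0).map
        ((fun fr => (pvMaxKids tree + 2) ^ fr.1) ∘
          (fun p => (f, p.2, depth + 1, p.1 == 0, pvNewPrefix depth is_last pfx)))).sum
        = children.length * (pvMaxKids tree + 2) ^ f := by
      simp [Function.comp_def, List.map_const', PySem.List.length_enumerate,
        List.sum_replicate, smul_eq_mul]
    rw [hk]
    have hpow : 0 < (pvMaxKids tree + 2) ^ f := Nat.pow_pos (by omega)
    have hlt : children.length * (pvMaxKids tree + 2) ^ f
        < (pvMaxKids tree + 2) ^ (f + 1) := by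
      rw [pow_succ, Nat.mul_comm ((pvMaxKids tree + 2) ^ f)]
      exact Nat.mul_lt_mul_of_lt_of_le (by omega) (le_refl _) hpow
    have hs : (pvMaxKids tree + 2) ^ f.succ = (pvMaxKids tree + 2) ^ (f + 1) := rfl
    omega

def build_inheritance_tree_alt (symbols : List (List (String × String))) : String :=
  match pvPass1 symbols with
  | (tree, some root) =>
    PySem.Str.join "" (pvLoopB tree [(symbols.length + 1, root.getD "name" "", 0, true, "")] [])
  | (_, none) => ""    -- Python B also raises AttributeError here; excluded by Pre_

-- ===== PRECONDITION & SPEC =====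

def pvTruthyBase (s : List (String × String)) : Bool :=
  ((PySem.Dict.ofList s).get? "base").getD "" != ""

-- edges (base, name) of the inheritance graph, for the truthy-base symbols
def pvEdges (symbols : List (List (String × String))) : List (String × String) :=
  symbols.filterMap (fun s =>
    if pvTruthyBase s then
      some (((PySem.Dict.ofList s).get? "base").getD "", (PySem.Dict.ofList s).getD "name" "")
    else none)

-- keep the edges whose source is some edge's target; iterating |edges| times empties the
-- list iff the edge set has no directed cycle
def pvPrune (es : List (String × String)) : List (String × String) :=
  es.filter (fun e => es.any (fun f => f.2 == e.1))

-- the name render_tree starts from: the last base-less symbol's name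
def pvRootName (symbols : List (List (String × String))) : Option String :=
  ((symbols.filter (fun s => !pvTruthyBase s)).map
    (fun s => (PySem.Dict.ofList s).getD "name" "")).getLast?

-- names reachable from the root along the edges (closure reached after |edges| rounds)
def pvReachable (symbols : List (List (String × String))) : List String :=
  match pvRootName symbols with
  | none => []
  | some r =>
    (fun R => R ++ (pvEdges symbols).filterMap
        (fun e => if R.contains e.1 && !R.contains e.2 then some e.2 else none))^[(pvEdges symbols).length]
      [r]

-- the edges the rendering can ever follow
def pvREdges (symbols : List (List (String × String))) : List (String × String) :=
  (pvEdges symbols).filter (fun e => (pvReachable symbols).contains e.1)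

-- Pre_: exactly the inputs on which the Python returns — every symbol has a "name" key (else
-- KeyError), some symbol has a falsy base so root is set (else root.get(...) raises
-- AttributeError), and no directed cycle is reachable from the root (else the recursion never
-- terminates: RecursionError).
def Pre_build_inheritance_tree (symbols : List (List (String × String))) : Prop :=
  (symbols.all (fun s => ((PySem.Dict.ofList s).get? "name").isSome)) = true ∧
  (symbols.any (fun s => !pvTruthyBase s)) = true ∧
  pvPrune^[(pvREdges symbols).length] (pvREdges symbols) = []

instance (symbols : List (List (String × String))) : Decidable (Pre_build_inheritance_tree symbols) := by
  unfold Pre_build_inheritance_tree; infer_instance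

def pvWitness_build_inheritance_tree : (List (List (String × String))) :=
  [[("name", "A")], [("name", "B"), ("base", "A")]]

def Spec_build_inheritance_tree (symbols : List (List (String × String))) (out : String) : Prop := out = build_inheritance_tree_alt symbols
instance (symbols : List (List (String × String))) (out : String) : Decidable (Spec_build_inheritance_tree symbols out) := by unfold Spec_build_inheritance_tree; infer_instance

-- ===== CLAIM (what is proved, stated in full; the proofs are below) =====
def Claim_equal_build_inheritance_tree : Prop := ∀ (symbols : List (List (String × String))), Dom_build_inheritance_tree symbols → Pre_build_inheritance_tree symbols → Spec_build_inheritance_tree symbols (build_inheritance_tree symbols)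

-- ===== LEMMAS AND PROOFS =====

-- ''.join over strings is the foldr of ++
theorem pvJoin_eq_foldr (l : List String) : PySem.Str.join "" l = l.foldr (· ++ ·) "" := by
  induction l with
  | nil => rfl
  | cons h t ih =>
    cases t with
    | nil => simp [PySem.Str.join]
    | cons h2 t2 =>
      rw [List.foldr_cons, ← ih]
      simp [PySem.Str.join, PySem.Chars.join_cons_cons]

-- concatenation of the renders of a stack of frames
def pvFramesStr (tree : PySem.Dict String (List String))
    (stack : List (Nat × String × Nat × Bool × String)) : String :=
  (stack.map (fun fr => pvRenderA tree fr.1 fr.2.1 fr.2.2.1 fr.2.2.2.1 fr.2.2.2.2)).foldr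
    (· ++ ·) ""

theorem pvFoldr_append (a b : List String) :
    (a ++ b).foldr (· ++ ·) "" = a.foldr (· ++ ·) "" ++ b.foldr (· ++ ·) "" := by
  induction a with
  | nil => simp
  | cons h t ih => simp [ih, String.append_assoc]

theorem pvFoldl_append_eq {α : Type} (g : α → String) (l : List α) (init : String) :
    l.foldl (fun acc x => acc ++ g x) init = init ++ (l.map g).foldr (· ++ ·) "" := by
  induction l generalizing init with
  | nil => simp
  | cons h t ih => simp [ih, String.append_assoc]

theorem pvFoldl_cons_rev {α β : Type} (g : α → β) (l : List α) (rest : List β) :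
    l.foldl (fun st x => g x :: st) rest = (l.map g).reverse ++ rest := by
  induction l generalizing rest with
  | nil => simp
  | cons h t ih => simp [ih]

-- pushing the reversed children with is_last = (i == 0) and reading the stack back is the same
-- list as enumerating the children with is_last = (i == len - 1)
theorem pvRevEnumMap {α β : Type} (l : List α) (h : α → Bool → β) :
    ((PySem.List.enumerate l.reverse 0).map (fun p => h p.2 (p.1 == 0))).reverse
      = (PySem.List.enumerate l 0).map (fun p => h p.2 (p.1 == (l.length : Int) - 1)) := by
  apply List.ext_getElem
  · simp [PySem.List.length_enumerate]
  · intro i h1 h2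
    have hi : i < l.length := by
      simpa [PySem.List.length_enumerate] using h2
    simp only [List.getElem_reverse, List.getElem_map, PySem.List.getElem_enumerate,
      List.length_map, PySem.List.length_enumerate, List.length_reverse]
    have hidx : l.length - 1 - (l.length - 1 - i) = i := by omega
    have hb : ((0 : Int) + ((l.length - 1 - i : Nat) : Int) == 0)
        = ((0 : Int) + (i : Int) == (l.length : Int) - 1) := by
      rw [Bool.eq_iff_iff]
      simp only [beq_iff_eq]
      omega
    simp only [hidx, hb]

-- main loop invariant: the joined output of pvLoopB is the lines so far plus the renders of
-- every frame remaining on the stack, in order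
theorem pvFramesStr_cons (tree : PySem.Dict String (List String))
    (fr : Nat × String × Nat × Bool × String) (rest : List (Nat × String × Nat × Bool × String)) :
    pvFramesStr tree (fr :: rest)
      = pvRenderA tree fr.1 fr.2.1 fr.2.2.1 fr.2.2.2.1 fr.2.2.2.2 ++ pvFramesStr tree rest := rfl

theorem pvFramesStr_append (tree : PySem.Dict String (List String))
    (a b : List (Nat × String × Nat × Bool × String)) :
    pvFramesStr tree (a ++ b) = pvFramesStr tree a ++ pvFramesStr tree b := by
  induction a with
  | nil => simp [pvFramesStr]
  | cons x t ih =>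
    rw [List.cons_append, pvFramesStr_cons, pvFramesStr_cons, ih, String.append_assoc]

theorem pvRenderA_none (tree : PySem.Dict String (List String)) (fuel : Nat) (n : String)
    (d : Nat) (l : Bool) (p : String) (h : tree.get? n = none) :
    pvRenderA tree fuel n d l p = pvLine n d l p := by
  rw [pvRenderA.eq_def]; simp [h]

theorem pvRenderA_zero (tree : PySem.Dict String (List String)) (n : String)
    (d : Nat) (l : Bool) (p : String) (ch : List String) (h : tree.get? n = some ch) :
    pvRenderA tree 0 n d l p = pvLine n d l p := by
  rw [pvRenderA.eq_def]; simp [h]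

theorem pvRenderA_succ (tree : PySem.Dict String (List String)) (f : Nat) (n : String)
    (d : Nat) (l : Bool) (p : String) (ch : List String) (h : tree.get? n = some ch) :
    pvRenderA tree (f + 1) n d l p
      = pvLine n d l p
        ++ ((PySem.List.enumerate ch 0).map
              (fun q => pvRenderA tree f q.2 (d + 1) (q.1 == (ch.length : Int) - 1)
                (pvNewPrefix d l p))).foldr (· ++ ·) "" := by
  rw [pvRenderA.eq_def]
  simp only [h]
  rw [pvFoldl_append_eq]

theorem pvLoopB_spec (tree : PySem.Dict String (List String))
    (stack : List (Nat × String × Nat × Bool × String)) (lines : List String) :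
    (pvLoopB tree stack lines).foldr (· ++ ·) ""
      = lines.foldr (· ++ ·) "" ++ pvFramesStr tree stack := by
  fun_induction pvLoopB tree stack lines with
  | case1 lines => simp [pvFramesStr]
  | case2 fuel name depth is_last pfx rest lines lines' h ih =>
    rw [ih, show lines' = lines ++ [pvLine name depth is_last pfx] from rfl,
      pvFoldr_append, pvFramesStr_cons, pvRenderA_none tree fuel name depth is_last pfx h]
    simp [String.append_assoc]
  | case3 name depth is_last pfx rest lines lines' ch h ih =>
    rw [ih, show lines' = lines ++ [pvLine name depth is_last pfx] from rfl,
      pvFoldr_append, pvFramesStr_cons, pvRenderA_zero tree name depth is_last pfx ch h]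
    simp [String.append_assoc]
  | case4 name depth is_last pfx rest lines lines' ch f h np ih =>
    simp only [List.unattach_reverse, List.unattach_attach] at ih
    rw [ih, show lines' = lines ++ [pvLine name depth is_last pfx] from rfl,
      show np = pvNewPrefix depth is_last pfx from rfl,
      pvFoldl_cons_rev, pvFramesStr_append, pvFoldr_append, pvFramesStr_cons]
    have hrev : pvFramesStr tree
        (((PySem.List.enumerate ch.reverse 0).map
          (fun p => (f, p.2, depth + 1, p.1 == 0, pvNewPrefix depth is_last pfx))).reverse)
        = ((PySem.List.enumerate ch 0).map
            (fun q => pvRenderA tree f q.2 (depth + 1) (q.1 == (ch.length : Int) - 1)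
              (pvNewPrefix depth is_last pfx))).foldr (· ++ ·) "" := by
      simp only [pvFramesStr, List.map_reverse, List.map_map, Function.comp_def]
      rw [pvRevEnumMap ch
        (fun c b => pvRenderA tree f c (depth + 1) b (pvNewPrefix depth is_last pfx))]
    rw [hrev, Nat.succ_eq_add_one, pvRenderA_succ tree f name depth is_last pfx ch h]
    simp [String.append_assoc]

theorem pvPorts_eq (symbols : List (List (String × String))) :
    build_inheritance_tree symbols = build_inheritance_tree_alt symbols := by
  unfold build_inheritance_tree build_inheritance_tree_alt
  rcases hp : pvPass1 symbols with ⟨tree, root⟩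
  cases root with
  | none => rfl
  | some r =>
    show pvRenderA tree (symbols.length + 1) (r.getD "name" "") 0 true ""
      = PySem.Str.join "" (pvLoopB tree [(symbols.length + 1, r.getD "name" "", 0, true, "")] [])
    rw [pvJoin_eq_foldr, pvLoopB_spec, pvFramesStr_cons]
    simp [pvFramesStr]

-- ===== VERDICT (by name: the statement is the Claim_ definition above) =====
theorem build_inheritance_tree_spec : Claim_equal_build_inheritance_tree := by
  intro symbols _ _
  unfold Spec_build_inheritance_tree
  exact pvPorts_eq symbols
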